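-- pv_equiv track=rewrite | github.com/adamhedin/advent-of-code | 1.py | f
-- ===== SOURCE A (Python) =====
-- def f(s):
--     oldchar = ''
--     groups = []
--     letters = ''
--     for char in s.strip():
--         if char.isdigit():
--             if letters:
--                 groups.append(letters.strip())
--             groups.append(char)
--             letters = ''
--         else:
--             letters = letters + char
--     if letters:
--         groups.append(letters.strip())
--     return groups
-- ===== SOURCE B (Python) =====
-- def f(s):
--     t = s.strip()
--     digits = [(i, c) for i, c in enumerate(t) if c.isdigit()]
--     out = []
--     prev = 0
--     for i, c in digits:
--         if prev < i:
--             out.append(t[prev:i].strip())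
--         out.append(c)
--         prev = i + 1
--     if prev < len(t):
--         out.append(t[prev:].strip())
--     return out
-- ===== Notes on version B (the rewrite author's own statement) =====
-- stated objective: alternative
-- what changed: Replaced A's single-pass character state machine (grow a 'letters' buffer, flush at each digit and at the end) by two staged passes: first collect all digit positions with enumerate, then emit output by slicing the string between consecutive digit positions (t[prev:i].strip()) with no character accumulator at all.
import Mathlib
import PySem

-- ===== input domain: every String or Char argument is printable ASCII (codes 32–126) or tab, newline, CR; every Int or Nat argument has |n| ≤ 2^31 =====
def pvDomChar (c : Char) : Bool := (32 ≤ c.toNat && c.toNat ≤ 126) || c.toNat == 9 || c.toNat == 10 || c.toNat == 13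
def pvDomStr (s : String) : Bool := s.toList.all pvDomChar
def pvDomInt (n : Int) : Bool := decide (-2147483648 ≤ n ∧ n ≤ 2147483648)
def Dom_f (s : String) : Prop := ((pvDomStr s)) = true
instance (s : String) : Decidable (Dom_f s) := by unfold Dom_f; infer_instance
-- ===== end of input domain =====

-- B replaces A's character state machine (letters buffer + flush) by two staged passes:
-- collect the digit positions first, then slice the string between consecutive digit positions.

-- ===== PORT A =====
-- A: one fold over the stripped string with state (groups, letters), flushing 'letters' at each digit and at the end.
def f (s : String) : List String :=
  let st := (PySem.Str.strip s).toList.foldl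
    (fun (st : List String × List Char) (c : Char) =>
      if PySem.Chars.isdigit c then
        ((if st.2.isEmpty then st.1 else st.1 ++ [String.ofList (PySem.Chars.strip st.2)]) ++ [String.ofList [c]], [])
      else (st.1, st.2 ++ [c]))
    ([], [])
  if st.2.isEmpty then st.1 else st.1 ++ [String.ofList (PySem.Chars.strip st.2)]

-- ===== PORT B =====
-- B: digits = [(i, c) for i, c in enumerate(t) if c.isdigit()]; then a fold over those
-- positions with state (out, prev): slice t[prev:i] (stripped) between digits, then t[prev:] at the end.
def f_alt (s : String) : List String :=
  let t := (PySem.Str.strip s).toList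
  let digits := (PySem.List.enumerate t 0).filter (fun p => PySem.Chars.isdigit p.2)
  let st := digits.foldl
    (fun (st : List String × Int) (p : Int × Char) =>
      ((if st.2 < p.1 then
          st.1 ++ [String.ofList (PySem.Chars.strip (PySem.List.slice t (some st.2) (some p.1)))]
        else st.1) ++ [String.ofList [p.2]], p.1 + 1))
    ([], 0)
  if st.2 < (t.length : Int) then
    st.1 ++ [String.ofList (PySem.Chars.strip (PySem.List.slice t (some st.2) none))]
  else st.1

-- ===== PRECONDITION & SPEC =====
def Spec_f (s : String) (out : List String) : Prop := out = f_alt s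
instance (s : String) (out : List String) : Decidable (Spec_f s out) := by unfold Spec_f; infer_instance

-- ===== CLAIM (what is proved, stated in full; the proofs are below) =====
def Claim_equal_f : Prop := ∀ (s : String), Dom_f s → Spec_f s (f s)

-- ===== LEMMAS AND PROOFS =====

-- flush of A's letters accumulator
def pvFlush (L : List Char) : List String :=
  if L.isEmpty then [] else [String.ofList (PySem.Chars.strip L)]

-- A's loop, written as structural recursion producing the suffix of groups
def pvAux : List Char → List Char → List String
  | [], L => pvFlush L
  | c :: cs, L =>
    if PySem.Chars.isdigit c then pvFlush L ++ String.ofList [c] :: pvAux cs []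
    else pvAux cs (L ++ [c])

theorem pvAux_eq_foldl (cs : List Char) (g : List String) (L : List Char) :
    (let st := cs.foldl
      (fun (st : List String × List Char) (c : Char) =>
        if PySem.Chars.isdigit c then
          ((if st.2.isEmpty then st.1 else st.1 ++ [String.ofList (PySem.Chars.strip st.2)]) ++ [String.ofList [c]], [])
        else (st.1, st.2 ++ [c])) (g, L)
     if st.2.isEmpty then st.1 else st.1 ++ [String.ofList (PySem.Chars.strip st.2)])
    = g ++ pvAux cs L := by
  induction cs generalizing g L with
  | nil =>
    simp only [List.foldl, pvAux, pvFlush]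
    split <;> simp
  | cons c cs ih =>
    simp only [List.foldl, pvAux]
    by_cases hd : PySem.Chars.isdigit c
    · simp only [hd, if_true, ih]
      unfold pvFlush
      split <;> simp
    · simp only [hd, if_false, Bool.false_eq_true, ih]

-- B's fold step and final flush, named so the loop lemma can rewrite cleanly
def pvStep (t : List Char) (st : List String × Int) (p : Int × Char) : List String × Int :=
  ((if st.2 < p.1 then
      st.1 ++ [String.ofList (PySem.Chars.strip (PySem.List.slice t (some st.2) (some p.1)))]
    else st.1) ++ [String.ofList [p.2]], p.1 + 1)

def pvFin (t : List Char) (st : List String × Int) : List String :=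
  if st.2 < (t.length : Int) then
    st.1 ++ [String.ofList (PySem.Chars.strip (PySem.List.slice t (some st.2) none))]
  else st.1

-- invariant: cs is the suffix of t from k, prev ≤ k, and t[prev:k] is A's pending letters
theorem pvB_loop (t : List Char) (cs : List Char) :
    ∀ (k prev : Nat) (acc : List String), prev ≤ k → t.drop k = cs →
    pvFin t (((PySem.List.enumerate cs (k : Int)).filter
        (fun p => PySem.Chars.isdigit p.2)).foldl (pvStep t) (acc, (prev : Int)))
    = acc ++ pvAux cs ((t.drop prev).take (k - prev)) := by
  induction cs with
  | nil =>
    intro k prev acc hpk hdrop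
    have hlen : t.length ≤ k := by
      have := congrArg List.length hdrop
      simp at this; omega
    simp only [PySem.List.enumerate_nil, List.filter_nil, List.foldl_nil, pvFin]
    have htake : (t.drop prev).take (k - prev) = t.drop prev := by
      apply List.take_of_length_le; simp; omega
    rw [htake, PySem.List.slice_from_natCast]
    by_cases hlt : prev < t.length
    · have hne : t.drop prev ≠ [] := by simp [List.drop_eq_nil_iff]; omega
      rw [if_pos (by omega)]
      simp [pvAux, pvFlush, List.isEmpty_iff, hne]
    · have hnil : t.drop prev = [] := by simp [List.drop_eq_nil_iff]; omega
      rw [if_neg (by omega)]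
      simp [pvAux, pvFlush, hnil]
  | cons c cs ih =>
    intro k prev acc hpk hdrop
    have hklen : k < t.length := by
      have := congrArg List.length hdrop
      simp at this; omega
    have hdrop' : t.drop (k + 1) = cs := by
      have : t.drop (k+1) = (t.drop k).drop 1 := by rw [List.drop_drop]
      rw [this, hdrop]; simp
    have hget : t[k]'hklen = c := by
      have : (t.drop k)[0]'(by simp [hdrop]) = c := by simp [hdrop]
      simpa using this
    have hslice : PySem.List.slice t (some (prev : Int)) (some (k : Int))
        = (t.drop prev).take (k - prev) := by
      rw [PySem.List.slice_toNat]
      · simp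
      · positivity
      · positivity
    have hcast : (k : Int) + 1 = ((k + 1 : Nat) : Int) := by push_cast; ring
    simp only [PySem.List.enumerate_cons, List.filter_cons]
    by_cases hd : PySem.Chars.isdigit c
    · have step : pvStep t (acc, (prev : Int)) ((k : Int), c)
          = (acc ++ pvFlush ((t.drop prev).take (k - prev)) ++ [String.ofList [c]],
             ((k + 1 : Nat) : Int)) := by
        unfold pvStep
        rw [hslice]
        by_cases hlt : prev < k
        · have hne : (t.drop prev).take (k - prev) ≠ [] := by
            simp [List.take_eq_nil_iff, List.drop_eq_nil_iff]; omega
          rw [if_pos (by omega)]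
          simp [pvFlush, List.isEmpty_iff, hne]
        · have hnil : (t.drop prev).take (k - prev) = [] := by
            have h0 : k - prev = 0 := by omega
            simp [h0]
          rw [if_neg (by omega)]
          simp [pvFlush, hnil]
      simp only [hd, if_pos, List.foldl_cons]
      rw [step, hcast, ih (k + 1) (k + 1) _ (le_refl _) hdrop']
      simp [pvAux, hd]
    · simp only [hd, Bool.false_eq_true, if_false]
      have hpend : (t.drop prev).take (k + 1 - prev) = (t.drop prev).take (k - prev) ++ [c] := by
        have hsub : k + 1 - prev = (k - prev) + 1 := by omega
        rw [hsub, List.take_add_one]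
        congr 1
        have hidx : k - prev < (t.drop prev).length := by simp; omega
        rw [List.getElem?_eq_getElem hidx]
        simp only [List.getElem_drop]
        have hpk2 : prev + (k - prev) = k := by omega
        simp [hpk2, hget]
      rw [hcast, ih (k + 1) prev acc (by omega) hdrop']
      rw [hpend]
      simp [pvAux, hd]

theorem f_alt_eq (s : String) :
    f_alt s = pvAux (PySem.Str.strip s).toList [] := by
  have h := pvB_loop (PySem.Str.strip s).toList (PySem.Str.strip s).toList 0 0 [] (le_refl _) (by simp)
  simp only [Nat.cast_zero, Nat.sub_zero, List.drop_zero, List.take_zero, List.nil_append] at h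
  exact h

-- ===== VERDICT (by name: the statement is the Claim_ definition above) =====
theorem f_spec : Claim_equal_f := by
  intro s _
  unfold Spec_f f
  rw [pvAux_eq_foldl, f_alt_eq]
  simp
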